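-- pv_equiv track=rewrite | github.com/CNLarrylai/MB2-ML-trasnaltion | overwrite all files replace with id.py | replace_id_no_id
-- ===== SOURCE A (Python) =====
-- def replace_id_no_id(_string):
--     index_left = _string.index('=')
--     temp= _string[index_left + 1:].replace(" ","_")
--     for r in ((" ", "_"), ("'", "_"),(":", "_"),(")", "_"),("(", "_")):
--         temp = temp.replace(*r)
--         temp = temp.replace("\"","")
--         temp = temp.replace("\n", "")
--     return temp.lower()
-- ===== SOURCE B (Python) =====
-- def replace_id_no_id(_string):
--     index_left = _string.index('=')
--     table = {' ': '_', "'": '_', ':': '_', ')': '_', '(': '_', '"': '', '\n': ''}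
--     return ''.join(table.get(ch, ch.lower()) for ch in _string[index_left + 1:])
-- ===== Notes on version B (the rewrite author's own statement) =====
-- stated objective: simpler
-- what changed: Replaces A's sixteen full-string .replace passes plus a final .lower pass with one table-driven pass (a 7-entry dict mapping/deleting each character, joined once); speed not measured, so no speed claim.
import Mathlib
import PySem

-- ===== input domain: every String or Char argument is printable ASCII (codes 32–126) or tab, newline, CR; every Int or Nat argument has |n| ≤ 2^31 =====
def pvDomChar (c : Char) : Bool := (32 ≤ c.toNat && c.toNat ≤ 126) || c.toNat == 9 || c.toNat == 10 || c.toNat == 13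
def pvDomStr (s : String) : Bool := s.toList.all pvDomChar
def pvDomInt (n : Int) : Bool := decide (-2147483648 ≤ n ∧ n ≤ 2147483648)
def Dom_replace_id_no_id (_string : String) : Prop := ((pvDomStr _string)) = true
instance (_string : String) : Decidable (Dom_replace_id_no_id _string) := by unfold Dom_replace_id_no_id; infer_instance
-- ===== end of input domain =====

-- B replaces A's sixteen full-string .replace passes (and a final .lower pass) with a single
-- table-driven pass that maps/deletes/lowercases each character once.

-- ===== PORT A =====
def replace_id_no_id (_string : String) : String :=
  -- _string.index('='): raises ValueError when '=' is absent — those inputs are outside Pre_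
  let index_left := PySem.Str.find _string "="
  let temp := PySem.Str.replace (PySem.Str.slice _string (some (index_left + 1)) none) " " "_"
  let temp := [(" ", "_"), ("'", "_"), (":", "_"), (")", "_"), ("(", "_")].foldl
      (fun temp r =>
        let temp := PySem.Str.replace temp r.1 r.2
        let temp := PySem.Str.replace temp "\"" ""
        PySem.Str.replace temp "\n" "") temp
  PySem.Str.lower temp

-- ===== PORT B =====
-- table.get(ch, ch.lower()): the 7-entry literal dict lookup with a default, ported as an
-- if-chain over the 7 literal keys (exact; '' ↦ [] is the deleting entry).
def pvTableGet (c : Char) : List Char :=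
  if c = ' ' then ['_'] else if c = '\'' then ['_'] else if c = ':' then ['_']
  else if c = ')' then ['_'] else if c = '(' then ['_']
  else if c = '"' then [] else if c = '\n' then []
  else [PySem.Chars.lowerChar c]

def replace_id_no_id_alt (_string : String) : String :=
  -- _string.index('='): same ValueError when '=' is absent — outside Pre_
  let index_left := PySem.Str.find _string "="
  -- ''.join(table.get(ch, ch.lower()) for ch in _string[index_left + 1:])
  String.ofList ((PySem.Str.slice _string (some (index_left + 1)) none).toList.flatMap pvTableGet)

-- ===== PRECONDITION & SPEC =====
-- Pre_ excludes exactly the strings without '=', on which Python's .index raises ValueError.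
def Pre_replace_id_no_id (_string : String) : Prop := PySem.Str.isIn "=" _string = true
instance (_string : String) : Decidable (Pre_replace_id_no_id _string) := by
  unfold Pre_replace_id_no_id; infer_instance
def pvWitness_replace_id_no_id : String := "id = Foo(Bar)"

def Spec_replace_id_no_id (_string : String) (out : String) : Prop := out = replace_id_no_id_alt _string
instance (_string : String) (out : String) : Decidable (Spec_replace_id_no_id _string out) := by unfold Spec_replace_id_no_id; infer_instance

-- ===== CLAIM (what is proved, stated in full; the proofs are below) =====
def Claim_equal_replace_id_no_id : Prop := ∀ (_string : String), Dom_replace_id_no_id _string → Pre_replace_id_no_id _string → Spec_replace_id_no_id _string (replace_id_no_id _string)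

-- ===== LEMMAS AND PROOFS =====

-- replace.go with a single-character pattern, with enough fuel, is a flatMap.
theorem pv_go_spec (o : Char) (new : List Char) :
    ∀ (fuel : Nat) (l acc : List Char), l.length ≤ fuel →
      PySem.Chars.replace.go [o] new fuel l acc
        = acc.reverse ++ l.flatMap (fun c => if c = o then new else [c]) := by
  intro fuel
  induction fuel with
  | zero =>
      intro l acc h
      have hl : l = [] := by cases l <;> simp_all
      subst hl
      simp [PySem.Chars.replace.go]
  | succ n ih =>
      intro l acc h
      cases l with
      | nil => simp [PySem.Chars.replace.go]
      | cons c t =>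
          rw [PySem.Chars.replace.go]
          by_cases hc : c = o
          · have hp : List.isPrefixOf [o] (c :: t) = true := by
              simp [List.isPrefixOf, hc]
            rw [if_pos hp]
            simp only [List.length_cons, List.length_nil, List.drop_succ_cons, List.drop_zero]
            rw [ih t (new.reverse ++ acc) (by simpa using Nat.le_of_succ_le_succ h)]
            simp [hc]
          · have hp : List.isPrefixOf [o] (c :: t) = false := by
              simp [List.isPrefixOf]
              exact fun h' => (hc h'.symm).elim
            rw [if_neg (by simp [hp])]
            rw [ih t (c :: acc) (by simpa using Nat.le_of_succ_le_succ h)]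
            simp [hc]

-- str.replace with a single-character pattern is a per-character flatMap.
theorem pv_replace_single (s : List Char) (o : Char) (new : List Char) :
    PySem.Chars.replace s [o] new = s.flatMap (fun c => if c = o then new else [c]) := by
  rw [PySem.Chars.replace]
  simp only [List.isEmpty_cons, Bool.false_eq_true, if_false]
  simpa using pv_go_spec o new s.length s [] (le_refl _)

-- the composition of A's 16 single-character replaces plus the final lower, per character
theorem pv_perchar (c : Char) :
    (((((((((((((((((if c = ' ' then ['_'] else [c]).flatMap
      (fun c => if c = ' ' then ['_'] else [c])).flatMap
      (fun c => if c = '"' then [] else [c])).flatMap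
      (fun c => if c = '\n' then [] else [c])).flatMap
      (fun c => if c = '\'' then ['_'] else [c])).flatMap
      (fun c => if c = '"' then [] else [c])).flatMap
      (fun c => if c = '\n' then [] else [c])).flatMap
      (fun c => if c = ':' then ['_'] else [c])).flatMap
      (fun c => if c = '"' then [] else [c])).flatMap
      (fun c => if c = '\n' then [] else [c])).flatMap
      (fun c => if c = ')' then ['_'] else [c])).flatMap
      (fun c => if c = '"' then [] else [c])).flatMap
      (fun c => if c = '\n' then [] else [c])).flatMap
      (fun c => if c = '(' then ['_'] else [c])).flatMap
      (fun c => if c = '"' then [] else [c])).flatMap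
      (fun c => if c = '\n' then [] else [c])).map PySem.Chars.lowerChar)
      = pvTableGet c := by
  by_cases h1 : c = ' '
  · subst h1; decide
  by_cases h2 : c = '\''
  · subst h2; decide
  by_cases h3 : c = ':'
  · subst h3; decide
  by_cases h4 : c = ')'
  · subst h4; decide
  by_cases h5 : c = '('
  · subst h5; decide
  by_cases h6 : c = '"'
  · subst h6; decide
  by_cases h7 : c = '\n'
  · subst h7; decide
  simp [pvTableGet, h1, h2, h3, h4, h5, h6, h7]

-- the whole 16-replace-then-lower chain, as one flatMap
theorem pv_chain : ∀ (cs : List Char),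
    (((((((((((((((((cs.flatMap
      (fun c => if c = ' ' then ['_'] else [c])).flatMap
      (fun c => if c = ' ' then ['_'] else [c])).flatMap
      (fun c => if c = '"' then [] else [c])).flatMap
      (fun c => if c = '\n' then [] else [c])).flatMap
      (fun c => if c = '\'' then ['_'] else [c])).flatMap
      (fun c => if c = '"' then [] else [c])).flatMap
      (fun c => if c = '\n' then [] else [c])).flatMap
      (fun c => if c = ':' then ['_'] else [c])).flatMap
      (fun c => if c = '"' then [] else [c])).flatMap
      (fun c => if c = '\n' then [] else [c])).flatMap
      (fun c => if c = ')' then ['_'] else [c])).flatMap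
      (fun c => if c = '"' then [] else [c])).flatMap
      (fun c => if c = '\n' then [] else [c])).flatMap
      (fun c => if c = '(' then ['_'] else [c])).flatMap
      (fun c => if c = '"' then [] else [c])).flatMap
      (fun c => if c = '\n' then [] else [c])).map PySem.Chars.lowerChar)
      = cs.flatMap pvTableGet := by
  intro cs
  induction cs with
  | nil => simp
  | cons c t ih =>
      simp only [List.flatMap_cons, List.flatMap_append, List.map_append]
      rw [ih, pv_perchar c]

-- ===== VERDICT (by name: the statement is the Claim_ definition above) =====
theorem replace_id_no_id_spec : Claim_equal_replace_id_no_id := by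
  intro s _ _
  simp only [Spec_replace_id_no_id, replace_id_no_id, replace_id_no_id_alt]
  simp only [List.foldl_cons, List.foldl_nil]
  simp only [PySem.Str.replace, PySem.Str.lower, String.toList_ofList,
    show (" " : String).toList = [' '] from rfl,
    show ("_" : String).toList = ['_'] from rfl,
    show ("'" : String).toList = ['\''] from rfl,
    show (":" : String).toList = [':'] from rfl,
    show (")" : String).toList = [')'] from rfl,
    show ("(" : String).toList = ['('] from rfl,
    show ("\"" : String).toList = ['"'] from rfl,
    show ("\n" : String).toList = ['\n'] from rfl,
    show ("" : String).toList = [] from rfl]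
  simp only [pv_replace_single, PySem.Chars.lower]
  rw [pv_chain]
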